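-- pv_equiv track=rewrite | github.com/nembizzang/SQL-coding-test | 백준/Silver/2805. 나무 자르기/나무 자르기.py | solution
-- ===== SOURCE A (Python) =====
-- from collections import Counter
--
-- def solution(m,trees):
--     counter = Counter(trees)
--     left,right = 0, 1000000000 # 이분 탐색의 시작과 끝
--     while left<(left+right)//2 :
--         mid = (left+right)//2 # 중간
--         tmp_m = 0 # 총 가져가는 나무 길이
--         for tree in counter : # 나무 높이 하나씩을 꺼내서
--             tmp_m += (tree-mid)*counter[tree] if tree>mid else 0
--         if tmp_m >= m : # 나무 길이가 m이상일때
--             left = mid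
--         else : # 나무 길이가 m미만일때
--             right = mid
--     return left # while 문을 빠져나오는 순간이 나무 길이가 m이상인 지점이므로
-- ===== SOURCE B (Python) =====
-- def _bisect_right(a, x):
--     # CPython's bisect.bisect_right algorithm (A imports no bisect, so it is written out)
--     lo, hi = 0, len(a)
--     while lo < hi:
--         mid = (lo + hi) // 2
--         if x < a[mid]:
--             hi = mid
--         else:
--             lo = mid + 1
--     return lo
--
--
-- def solution(m, trees):
--     srt = sorted(trees)
--     n = len(srt)
--     prefix = [0]
--     total = 0
--     for t in srt:
--         total += t
--         prefix.append(total)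
--     left, right = 0, 1000000000
--     while left + 1 < right:
--         mid = (left + right) // 2
--         idx = _bisect_right(srt, mid)
--         harvested = (total - prefix[idx]) - mid * (n - idx)
--         if harvested >= m:
--             left = mid
--         else:
--             right = mid
--     return left
-- ===== Notes on version B (the rewrite author's own statement) =====
-- stated objective: faster
-- what changed: B sorts the heights once and builds a prefix-sum table, then each binary-search iteration computes the harvest with one bisect_right lookup (O(log n)) instead of A's rescan of every distinct height via a Counter.
import Mathlib
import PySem

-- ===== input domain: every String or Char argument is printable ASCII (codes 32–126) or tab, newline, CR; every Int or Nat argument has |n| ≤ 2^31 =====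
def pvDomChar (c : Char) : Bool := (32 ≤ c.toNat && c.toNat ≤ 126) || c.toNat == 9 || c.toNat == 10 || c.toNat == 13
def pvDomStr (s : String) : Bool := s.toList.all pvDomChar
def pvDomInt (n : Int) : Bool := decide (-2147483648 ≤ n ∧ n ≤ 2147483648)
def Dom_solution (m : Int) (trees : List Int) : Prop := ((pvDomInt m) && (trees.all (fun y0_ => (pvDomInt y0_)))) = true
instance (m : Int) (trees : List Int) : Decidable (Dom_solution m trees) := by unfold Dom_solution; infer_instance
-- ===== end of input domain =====

-- B replaces A's per-iteration scan over all distinct heights (a Counter) by sort + prefix sums +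
-- a bisect_right lookup per binary-search iteration; the binary search itself is unchanged.


-- ===== PORT A =====
-- the 'while left < (left+right)//2' loop of A; fuel is only a totality guard: the interval
-- [left,right] halves each iteration, so 10^9 fuel is never exhausted from solution's call
def solutionLoopA (m : Int) (counter : PySem.Dict Int Int) : Nat → Int → Int → Int
  | 0, left, _right => left
  | fuel + 1, left, right =>
    if left < PySem.Int.floordiv (left + right) 2 then
      let mid := PySem.Int.floordiv (left + right) 2
      let tmp_m := (counter.keys).foldl
        (fun acc tree => acc + (if tree > mid then (tree - mid) * counter.getD tree 0 else 0)) 0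
      if tmp_m ≥ m then solutionLoopA m counter fuel mid right
      else solutionLoopA m counter fuel left mid
    else left

def solution (m : Int) (trees : List Int) : Int :=
  let counter := PySem.Dict.counter trees
  solutionLoopA m counter 1000000000 0 1000000000

-- ===== PORT B =====
-- the 'while left + 1 < right' loop of B; _bisect_right in Source B is CPython's bisect.bisect_right
-- algorithm verbatim, ported as the prelude's primitive PySem.List.bisectRight; prefix[idx] is
-- always in range (0 ≤ idx ≤ len(prefix)-1), so pyGetD is exact here
def solutionLoopB (m : Int) (srt prefixs : List Int) (total n : Int) : Nat → Int → Int → Int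
  | 0, left, _right => left
  | fuel + 1, left, right =>
    if left + 1 < right then
      let mid := PySem.Int.floordiv (left + right) 2
      let idx : Int := ((PySem.List.bisectRight srt mid : Nat) : Int)
      let harvested := (total - PySem.List.pyGetD prefixs idx 0) - mid * (n - idx)
      if harvested ≥ m then solutionLoopB m srt prefixs total n fuel mid right
      else solutionLoopB m srt prefixs total n fuel left mid
    else left

def solution_alt (m : Int) (trees : List Int) : Int :=
  let srt := PySem.List.sorted trees (fun x => x)
  let n : Int := (srt.length : Int)
  let st := srt.foldl (fun (st : List Int × Int) t => (st.1 ++ [st.2 + t], st.2 + t)) ([0], 0)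
  solutionLoopB m srt st.1 st.2 n 1000000000 0 1000000000

-- ===== PRECONDITION & SPEC =====
def Spec_solution (m : Int) (trees : List Int) (out : Int) : Prop := out = solution_alt m trees
instance (m : Int) (trees : List Int) (out : Int) : Decidable (Spec_solution m trees out) := by unfold Spec_solution; infer_instance

-- ===== CLAIM (what is proved, stated in full; the proofs are below) =====
def Claim_equal_solution : Prop := ∀ (m : Int) (trees : List Int), Dom_solution m trees → Spec_solution m trees (solution m trees)

-- ===== LEMMAS AND PROOFS =====

-- A's loop guard 'left < (left+right)//2' and B's 'left + 1 < right' are the same condition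
theorem pvMidFacts (l r : Int) :
    (l < PySem.Int.floordiv (l + r) 2 ↔ l + 1 < r) ∧
    (l + 1 < r → l < PySem.Int.floordiv (l + r) 2 ∧ PySem.Int.floordiv (l + r) 2 < r) := by
  have h1 := PySem.Int.floordiv_mul_add_mod (l + r) 2
  have h2 := PySem.Int.mod_nonneg (l + r) (by norm_num : (0:Int) < 2)
  have h3 := PySem.Int.mod_lt (l + r) (by norm_num : (0:Int) < 2)
  omega


-- prefix sums of l starting from accumulator acc (proof-side model of B's prefix list)
def psums : List Int → Int → List Int
  | [], _ => []
  | t :: l, acc => (acc + t) :: psums l (acc + t)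

theorem psums_fold (l : List Int) (p0 : List Int) (acc : Int) :
    l.foldl (fun (st : List Int × Int) t => (st.1 ++ [st.2 + t], st.2 + t)) (p0, acc)
      = (p0 ++ psums l acc, acc + l.sum) := by
  induction l generalizing p0 acc with
  | nil => simp [psums]
  | cons t l ih => simp [psums, ih, List.append_assoc]; ring

theorem psums_getElem? (l : List Int) (acc : Int) (i : Nat) (hi : i < l.length) :
    (psums l acc)[i]? = some (acc + (l.take (i + 1)).sum) := by
  induction l generalizing acc i with
  | nil => simp at hi
  | cons t l ih =>
    cases i with
    | zero => simp [psums]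
    | succ j =>
      simp only [psums, List.getElem?_cons_succ]
      rw [ih (acc + t) j (by simpa using hi)]
      simp [add_assoc]

theorem prefix_get (srt : List Int) (k : Nat) (hk : k ≤ srt.length) :
    PySem.List.pyGetD (0 :: psums srt 0) ((k : Nat) : Int) 0 = (srt.take k).sum := by
  rw [PySem.List.pyGetD_natCast]
  cases k with
  | zero => simp
  | succ j =>
    rw [List.getD_eq_getElem?_getD]
    simp only [List.getElem?_cons_succ]
    rw [psums_getElem? srt 0 j (by omega)]
    simp

-- A's per-iteration scan over the Counter equals B's prefix-table expression, for every mid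
theorem harvested_eq (trees : List Int) (mid : Int) :
    ((PySem.Dict.counter trees).keys).foldl
      (fun acc tree => acc + (if tree > mid then (tree - mid) * (PySem.Dict.counter trees).getD tree 0 else 0)) 0
    = ((PySem.List.sorted trees (fun x => x)).sum
        - PySem.List.pyGetD (0 :: psums (PySem.List.sorted trees (fun x => x)) 0)
            ((PySem.List.bisectRight (PySem.List.sorted trees (fun x => x)) mid : Nat) : Int) 0)
      - mid * (((PySem.List.sorted trees (fun x => x)).length : Int)
        - ((PySem.List.bisectRight (PySem.List.sorted trees (fun x => x)) mid : Nat) : Int)) := by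
  set srt := PySem.List.sorted trees (fun x => x) with hsrt
  set idx := PySem.List.bisectRight srt mid with hidx
  set g0 : Int → Int := fun t => if mid < t then t - mid else 0 with hg0
  have hperm : srt.Perm trees := PySem.List.sorted_perm trees (fun x => x) false
  have hpair : List.Pairwise (fun a b : Int => a ≤ b) srt := by
    simpa using PySem.List.sorted_pairwise trees (fun x => x)
  obtain ⟨hle, hbefore, hafter⟩ := PySem.List.bisectRight_spec srt mid hpair
  rw [PySem.Dict.keys_counter]
  simp only [PySem.Dict.getD_counter]
  rw [PySem.List.foldl_add, zero_add]
  rw [prefix_get srt idx hle]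
  -- left side: Counter scan = sum of g0 over the whole list
  have hfin : (PySem.Set.ofList trees).toFinset = trees.toFinset := by
    apply Finset.ext; intro a
    simp [List.mem_toFinset, PySem.Set.mem_ofList]
  have hL : (List.map (fun tree => if tree > mid then (tree - mid) * ((List.count tree trees : Nat) : Int) else 0)
      (PySem.Set.ofList trees)).sum = (List.map g0 srt).sum := by
    rw [← List.sum_toFinset _ (PySem.Set.nodup_ofList trees), hfin]
    rw [(hperm.map g0).sum_eq, Finset.sum_list_map_count]
    apply Finset.sum_congr rfl
    intro k _
    by_cases hk : mid < k
    · simp only [hg0, gt_iff_lt, if_pos hk]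
      push_cast [nsmul_eq_mul]
      ring
    · simp [hg0, hk]
  rw [hL]
  -- right side: split the sorted list at idx
  have htz : ∀ x ∈ srt.take idx, g0 x = 0 := by
    intro x hx
    obtain ⟨j, hj, rfl⟩ := List.mem_iff_getElem.mp hx
    rw [List.getElem_take]
    have hj' : j < idx := by
      have := hj; rw [List.length_take] at this; omega
    have hjlen : j < srt.length := by
      have := hj; rw [List.length_take] at this; omega
    have := hbefore j hjlen hj'
    simp [hg0, not_lt.mpr this]
  have htd : ∀ x ∈ srt.drop idx, g0 x = x + (-mid) := by
    intro x hx
    obtain ⟨j, hj, rfl⟩ := List.mem_iff_getElem.mp hx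
    rw [List.getElem_drop]
    have hjlen : idx + j < srt.length := by
      have := hj; rw [List.length_drop] at this; omega
    have := hafter (idx + j) hjlen (Nat.le_add_right _ _)
    simp [hg0, this]; ring
  have hsplit : (List.map g0 srt).sum
      = (List.map g0 (srt.take idx)).sum + (List.map g0 (srt.drop idx)).sum := by
    conv_lhs => rw [← List.take_append_drop idx srt]
    rw [List.map_append, List.sum_append]
  have h1 : (List.map g0 (srt.take idx)).sum = 0 := by
    apply List.sum_eq_zero
    intro x hx
    obtain ⟨y, hy, rfl⟩ := List.mem_map.mp hx
    exact htz y hy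
  have h2 : (List.map g0 (srt.drop idx)).sum
      = (srt.drop idx).sum + ((srt.drop idx).length : Int) * (-mid) := by
    rw [List.map_congr_left htd, PySem.List.sum_map_add_int (srt.drop idx) (fun t => t) (fun _ => -mid)]
    rw [PySem.List.sum_map_const_int]
    simp [List.map_id']
  have h3 : (srt.take idx).sum + (srt.drop idx).sum = srt.sum :=
    List.sum_take_add_sum_drop srt idx
  have h4 : (srt.drop idx).length = srt.length - idx := List.length_drop
  have hcast : ((srt.length - idx : Nat) : Int) = (srt.length : Int) - (idx : Int) := by omega
  rw [hsplit, h1, h2, h4, hcast]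
  ring_nf
  omega

theorem loop_eq (m : Int) (trees : List Int) (fuel : Nat) :
    ∀ l r : Int,
      solutionLoopA m (PySem.Dict.counter trees) fuel l r
      = solutionLoopB m (PySem.List.sorted trees (fun x => x))
          (0 :: psums (PySem.List.sorted trees (fun x => x)) 0)
          ((PySem.List.sorted trees (fun x => x)).sum)
          (((PySem.List.sorted trees (fun x => x)).length : Int)) fuel l r := by
  induction fuel with
  | zero => intro l r; rfl
  | succ fuel ih =>
    intro l r
    rw [solutionLoopA, solutionLoopB]
    have h := (pvMidFacts l r).1
    by_cases hc : l + 1 < r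
    · rw [if_pos (h.mpr hc), if_pos hc]
      simp only [harvested_eq trees (PySem.Int.floordiv (l + r) 2)]
      split
      · exact ih _ _
      · exact ih _ _
    · rw [if_neg (fun hh => hc (h.mp hh)), if_neg hc]

-- ===== VERDICT (by name: the statement is the Claim_ definition above) =====
theorem solution_spec : Claim_equal_solution := by
  intro m trees _
  unfold Spec_solution solution solution_alt
  simp only [psums_fold, List.cons_append, List.nil_append, zero_add]
  exact loop_eq m trees 1000000000 0 1000000000
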